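-- pv_equiv track=rewrite | github.com/MrBrantCode/unitest_baseline | mut_generate/mist_train_cf/cf_14226/solution.py | convert_addresses
-- ===== SOURCE A (Python) =====
-- def convert_addresses(addresses):
--     address_list = addresses.split(',')
--     num_addresses = len(address_list) // 4
--     result = []
--
--     for i in range(num_addresses):
--         start_index = i * 4
--         address = {}
--         address['street'] = address_list[start_index].strip()
--         address['city'] = address_list[start_index + 1].strip()
--         address['state'] = address_list[start_index + 2].strip()
--         address['zip'] = address_list[start_index + 3].strip()
--         result.append(address)
--
--     return result
-- ===== SOURCE B (Python) =====
-- def convert_addresses(addresses):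
--     keys = ('street', 'city', 'state', 'zip')
--     result = []
--     current = []
--     for field in addresses.split(','):
--         current.append(field.strip())
--         if len(current) == 4:
--             result.append(dict(zip(keys, current)))
--             current = []
--     return result
-- ===== Notes on version B (the rewrite author's own statement) =====
-- stated objective: alternative
-- what changed: A first counts len//4 and then loops over group indices reading four fields by offset arithmetic; B is a single pass over the fields with an accumulator: it collects stripped fields into a partial group, emits dict(zip(keys, group)) whenever the group reaches four, so the count and all index arithmetic disappear and a trailing partial group is dropped naturally.
import Mathlib
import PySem

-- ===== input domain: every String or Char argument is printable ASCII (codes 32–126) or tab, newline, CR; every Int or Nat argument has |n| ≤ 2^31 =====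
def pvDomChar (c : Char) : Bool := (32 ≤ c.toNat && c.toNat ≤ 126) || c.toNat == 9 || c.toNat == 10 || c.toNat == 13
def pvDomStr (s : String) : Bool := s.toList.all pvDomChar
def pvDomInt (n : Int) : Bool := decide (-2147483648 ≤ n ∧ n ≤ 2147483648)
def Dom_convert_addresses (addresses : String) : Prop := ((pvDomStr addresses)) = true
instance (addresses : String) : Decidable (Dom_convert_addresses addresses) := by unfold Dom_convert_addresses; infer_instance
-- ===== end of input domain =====

-- B replaces A's staged count-then-offset-index loop with a single pass over the fields carrying a partial-group accumulator (emitted at size 4); alternative decomposition, same cost.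

-- ===== PORT A =====
def convert_addresses (addresses : String) : List (List (String × String)) :=
  let address_list := (PySem.Str.split? addresses ",").getD []   -- sep is the non-empty ",", so split? is never none
  let num_addresses := PySem.Int.floordiv (address_list.length : Int) 4
  (PySem.List.pyRange 0 num_addresses 1).foldl (fun result i =>
    let start_index := i * 4
    let address : PySem.Dict String String := PySem.Dict.empty
    let address := address.insert "street" (PySem.Str.strip (PySem.List.pyGetD address_list start_index ""))
    let address := address.insert "city" (PySem.Str.strip (PySem.List.pyGetD address_list (start_index + 1) ""))
    let address := address.insert "state" (PySem.Str.strip (PySem.List.pyGetD address_list (start_index + 2) ""))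
    let address := address.insert "zip" (PySem.Str.strip (PySem.List.pyGetD address_list (start_index + 3) ""))
    result ++ [address.items]) []

-- ===== PORT B =====
-- one step of B's loop: append the stripped field to the partial group; when it has 4
-- entries, emit dict(zip(keys, current)) — keys are 4 distinct literals, so the dict's
-- items ARE the zip of keys with current (exact) — and reset the partial group
def pvStep (st : List (List (String × String)) × List String) (field : String) :
    List (List (String × String)) × List String :=
  let current := st.2 ++ [PySem.Str.strip field]
  if current.length == 4 then
    (st.1 ++ [["street", "city", "state", "zip"].zip current], [])
  else (st.1, current)

def convert_addresses_alt (addresses : String) : List (List (String × String)) :=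
  let fields := (PySem.Str.split? addresses ",").getD []   -- sep is the non-empty ",", so split? is never none
  (fields.foldl pvStep ([], [])).1

-- ===== PRECONDITION & SPEC =====
def Spec_convert_addresses (addresses : String) (out : List (List (String × String))) : Prop := out = convert_addresses_alt addresses
instance (addresses : String) (out : List (List (String × String))) : Decidable (Spec_convert_addresses addresses out) := by unfold Spec_convert_addresses; infer_instance

-- ===== CLAIM (what is proved, stated in full; the proofs are below) =====
def Claim_equal_convert_addresses : Prop := ∀ (addresses : String), Dom_convert_addresses addresses → Spec_convert_addresses addresses (convert_addresses addresses)

-- ===== LEMMAS AND PROOFS =====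

-- consecutive groups of 4 fields, incomplete trailing group dropped (proof-side common shape)
def pvChunks4 {α : Type} : List α → List (List α)
  | a :: b :: c :: d :: rest => [a, b, c, d] :: pvChunks4 rest
  | _ => []

-- the row A builds from the group starting at index k*4, with Nat indices
def pvRow (fields : List String) (k : Nat) : List (String × String) :=
  (((((PySem.Dict.empty : PySem.Dict String String).insert "street"
      (PySem.Str.strip (fields.getD (k * 4) ""))).insert "city"
      (PySem.Str.strip (fields.getD (k * 4 + 1) ""))).insert "state"
      (PySem.Str.strip (fields.getD (k * 4 + 2) ""))).insert "zip"
      (PySem.Str.strip (fields.getD (k * 4 + 3) ""))).items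

theorem pv_nat (fields : List String) :
    (List.range (fields.length / 4)).map (pvRow fields) =
    (pvChunks4 fields).map (fun group =>
      ["street", "city", "state", "zip"].zip (group.map PySem.Str.strip)) := by
  induction fields using pvChunks4.induct with
  | case1 a b c d rest ih =>
    have hlen : (a :: b :: c :: d :: rest).length / 4 = rest.length / 4 + 1 := by
      simp [List.length]; omega
    have hrow : ∀ k : Nat, pvRow (a :: b :: c :: d :: rest) (k + 1) = pvRow rest k := by
      intro k
      unfold pvRow
      rw [show (k+1)*4 = k*4+4 from by ring, show k*4+4+1 = (k*4+1)+4 from by ring,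
          show k*4+4+2 = (k*4+2)+4 from by ring, show k*4+4+3 = (k*4+3)+4 from by ring]
      rfl
    rw [hlen, List.range_succ_eq_map, List.map_cons, List.map_map, pvChunks4, List.map_cons]
    refine congrArg₂ _ rfl ?_
    rw [show pvRow (a :: b :: c :: d :: rest) ∘ Nat.succ = pvRow rest from funext hrow, ih]
  | case2 t h =>
    match t, h with
    | [], _ => rfl
    | [a], _ => simp [pvChunks4]
    | [a,b], _ => simp [pvChunks4]
    | [a,b,c], _ => simp [pvChunks4]
    | a::b::c::d::r, h => exact absurd rfl (h a b c d r)

theorem pv_core (fields : List String) :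
    (PySem.List.pyRange 0 (PySem.Int.floordiv (fields.length : Int) 4) 1).foldl (fun result i =>
      result ++ [(((((PySem.Dict.empty : PySem.Dict String String).insert "street"
          (PySem.Str.strip (PySem.List.pyGetD fields (i * 4) ""))).insert "city"
          (PySem.Str.strip (PySem.List.pyGetD fields (i * 4 + 1) ""))).insert "state"
          (PySem.Str.strip (PySem.List.pyGetD fields (i * 4 + 2) ""))).insert "zip"
          (PySem.Str.strip (PySem.List.pyGetD fields (i * 4 + 3) ""))).items]) [] =
    (pvChunks4 fields).map (fun group =>
      ["street", "city", "state", "zip"].zip (group.map PySem.Str.strip)) := by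
  have hfd : PySem.Int.floordiv (fields.length : Int) 4 = ((fields.length / 4 : Nat) : Int) := by
    exact_mod_cast PySem.Int.floordiv_natCast fields.length 4
  rw [hfd, PySem.List.pyRange_zero_nat, PySem.List.foldl_append_singleton_eq_map, List.nil_append,
      List.map_map]
  rw [show ((fun i : Int => (((((PySem.Dict.empty : PySem.Dict String String).insert "street"
          (PySem.Str.strip (PySem.List.pyGetD fields (i * 4) ""))).insert "city"
          (PySem.Str.strip (PySem.List.pyGetD fields (i * 4 + 1) ""))).insert "state"
          (PySem.Str.strip (PySem.List.pyGetD fields (i * 4 + 2) ""))).insert "zip"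
          (PySem.Str.strip (PySem.List.pyGetD fields (i * 4 + 3) ""))).items) ∘ (fun k : Nat => (k : Int)))
        = pvRow fields from funext fun k => by
      simp only [Function.comp, pvRow]
      rw [show ((k:Int)*4) = ((k*4:Nat):Int) from by push_cast; ring,
          show ((k*4:Nat):Int) + 1 = ((k*4+1:Nat):Int) from by push_cast; ring,
          show ((k*4:Nat):Int) + 2 = ((k*4+2:Nat):Int) from by push_cast; ring,
          show ((k*4:Nat):Int) + 3 = ((k*4+3:Nat):Int) from by push_cast; ring]
      rw [PySem.List.pyGetD_natCast, PySem.List.pyGetD_natCast,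
          PySem.List.pyGetD_natCast, PySem.List.pyGetD_natCast]]
  exact pv_nat fields

-- B's single-pass fold, started on an empty partial group, emits exactly the complete 4-groups
theorem pv_fold (fields : List String) : ∀ acc : List (List (String × String)),
    (fields.foldl pvStep (acc, [])).1 =
    acc ++ (pvChunks4 fields).map (fun group =>
      ["street", "city", "state", "zip"].zip (group.map PySem.Str.strip)) := by
  induction fields using pvChunks4.induct with
  | case1 a b c d rest ih =>
    intro acc
    have hstep : (a :: b :: c :: d :: rest).foldl pvStep (acc, []) =
        rest.foldl pvStep
          (acc ++ [["street", "city", "state", "zip"].zip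
            [PySem.Str.strip a, PySem.Str.strip b, PySem.Str.strip c, PySem.Str.strip d]], []) := by
      simp [List.foldl_cons, pvStep]
    rw [hstep, ih, pvChunks4]
    simp
  | case2 t h =>
    intro acc
    match t, h with
    | [], _ => simp [pvChunks4]
    | [a], _ => simp [pvChunks4, pvStep]
    | [a,b], _ => simp [pvChunks4, pvStep]
    | [a,b,c], _ => simp [pvChunks4, pvStep]
    | a::b::c::d::r, h => exact absurd rfl (h a b c d r)

-- ===== VERDICT (by name: the statement is the Claim_ definition above) =====
theorem convert_addresses_spec : Claim_equal_convert_addresses := by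
  intro s _
  unfold Spec_convert_addresses convert_addresses convert_addresses_alt
  rw [pv_fold ((PySem.Str.split? s ",").getD []) []]
  simpa using pv_core ((PySem.Str.split? s ",").getD [])
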